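-- pv_equiv track=rewrite | github.com/codesquad-backend-study/daily-algorithm-challenge | Sully/baekjoon/B1927.py | solution
-- ===== SOURCE A (Python) =====
-- import heapq
-- from typing import List
--
-- def solution(nums: List[int]) -> List[int]:
--     answer = []
--
--     # x가 0이라면 배열에서 가장 작은 값을 출력하고, 그 값을 배열에서 제거
--     h = []
--     for x in nums:
--         if x == 0:
--             if h:
--                 answer.append(heapq.heappop(h))
--                 continue
--
--             # 만약 배열이 비어 있는 경우인데 가장 작은 값을 출력하라고 한 경우에는 0을 출력
--             answer.append(0)
--             continue
--
--         heapq.heappush(h, x)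
--
--     return answer
-- ===== SOURCE B (Python) =====
-- import bisect
-- from typing import List
--
-- def solution(nums: List[int]) -> List[int]:
--     answer = []
--     neg = []  # negated pending values, kept fully sorted ascending; current minimum is -neg[-1]
--     for x in nums:
--         if x != 0:
--             bisect.insort(neg, -x)
--         else:
--             answer.append(-neg.pop() if neg else 0)
--     return answer
-- ===== Notes on version B (the rewrite author's own statement) =====
-- stated objective: simpler
-- what changed: Replaces the binary heap (heapq sift-up/sift-down on an array) by a plain list of negated values kept fully sorted with bisect.insort; the minimum is popped from the end of that list, so the maintained invariant (total order vs heap order) and per-step work are different.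
import Mathlib
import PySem

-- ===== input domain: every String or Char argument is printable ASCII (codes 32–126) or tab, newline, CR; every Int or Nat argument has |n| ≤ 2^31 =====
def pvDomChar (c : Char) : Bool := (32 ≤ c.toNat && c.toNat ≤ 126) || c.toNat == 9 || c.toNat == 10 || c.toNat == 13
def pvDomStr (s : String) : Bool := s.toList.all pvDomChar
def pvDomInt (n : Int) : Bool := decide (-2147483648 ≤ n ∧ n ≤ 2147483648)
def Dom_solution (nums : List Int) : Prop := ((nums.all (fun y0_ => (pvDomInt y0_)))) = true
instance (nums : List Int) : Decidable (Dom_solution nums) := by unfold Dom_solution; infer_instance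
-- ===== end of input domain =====

-- B replaces A's binary heap (heapq sift-up/sift-down on an array) by a plain list kept
-- fully sorted with bisect.insort (negated values, so the minimum is popped from the end) (objective: simpler).

-- ===== PORT A =====
-- CPython heapq._siftdown, transliterated (the while loop is the structural recursion on
-- pos; the call sites keep every index read in range, so in-range reads use getD — exact there).
def siftdown (heap : List Int) (startpos : Nat) (newitem : Int) (pos : Nat) : List Int :=
  if _h : startpos < pos then
    let parentpos := (pos - 1) / 2
    let parent := heap.getD parentpos 0
    if newitem < parent then
      siftdown (heap.set pos parent) startpos newitem parentpos
    else heap.set pos newitem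
  else heap.set pos newitem
termination_by pos
decreasing_by omega

-- CPython heapq._siftup, transliterated (the two recursive calls are the two outcomes of
-- CPython's "pick the smaller child" update of childpos inside its while loop).
def siftup (heap : List Int) (startpos : Nat) (pos : Nat) (newitem : Int) : List Int :=
  let endpos := heap.length
  let childpos := 2 * pos + 1
  if _hc : childpos < endpos then
    let rightpos := childpos + 1
    if _hr : rightpos < endpos ∧ ¬ heap.getD childpos 0 < heap.getD rightpos 0 then
      siftup (heap.set pos (heap.getD rightpos 0)) startpos rightpos newitem
    else
      siftup (heap.set pos (heap.getD childpos 0)) startpos childpos newitem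
  else
    siftdown (heap.set pos newitem) startpos newitem pos
termination_by heap.length - pos
decreasing_by all_goals simp only [List.length_set]; omega

-- heapq.heappush: append, then sift the new item up from the last position
def heappush (heap : List Int) (item : Int) : List Int :=
  siftdown (heap ++ [item]) 0 item heap.length

-- heapq.heappop (A only calls it on a nonempty heap): pop the last element, move it to the
-- root, sift it down; returns (popped minimum, new heap)
def heappop (heap : List Int) : Int × List Int :=
  let lastelt := heap.getLastD 0
  let rest := heap.dropLast
  if rest.isEmpty then (lastelt, [])
  else (rest.getD 0 0, siftup (rest.set 0 lastelt) 0 0 lastelt)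

def solutionStep (st : List Int × List Int) (x : Int) : List Int × List Int :=
  if x == 0 then
    if st.1.isEmpty then (st.1, st.2 ++ [0])
    else
      let p := heappop st.1
      (p.2, st.2 ++ [p.1])
  else (heappush st.1 x, st.2)

def solution (nums : List Int) : List Int :=
  (nums.foldl solutionStep ([], [])).2

-- ===== PORT B =====
-- bisect.insort(h, x): insert x at bisect_right position, keeping h sorted
def insort (h : List Int) (x : Int) : List Int :=
  PySem.List.insert h ((PySem.List.bisectRight h x : Nat) : Int) x

def altStep (st : List Int × List Int) (x : Int) : List Int × List Int :=
  if x ≠ 0 then (insort st.1 (-x), st.2)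
  else if st.1.isEmpty then (st.1, st.2 ++ [0])
  else (st.1.dropLast, st.2 ++ [-(st.1.getLastD 0)])

def solution_alt (nums : List Int) : List Int :=
  (nums.foldl altStep ([], [])).2

-- ===== PRECONDITION & SPEC =====
def Spec_solution (nums : List Int) (out : List Int) : Prop := out = solution_alt nums
instance (nums : List Int) (out : List Int) : Decidable (Spec_solution nums out) := by unfold Spec_solution; infer_instance

-- ===== CLAIM (what is proved, stated in full; the proofs are below) =====
def Claim_equal_solution : Prop := ∀ (nums : List Int), Dom_solution nums → Spec_solution nums (solution nums)

-- ===== LEMMAS AND PROOFS =====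

theorem getD_set (l : List Int) (i : Nat) (a : Int) (j : Nat) :
    (l.set i a).getD j 0 = if i = j ∧ j < l.length then a else l.getD j 0 := by
  simp [List.getD_eq_getElem?_getD, List.getElem?_set]
  split_ifs with h1 h2 h3 <;> simp_all
theorem count_set (l : List Int) (i : Nat) (hi : i < l.length) (a v : Int) :
    (l.set i a).count v + (if l.getD i 0 = v then 1 else 0)
      = l.count v + (if a = v then 1 else 0) := by
  induction l generalizing i with
  | nil => simp at hi
  | cons x xs ih =>
    cases i with
    | zero => simp [List.count_cons]; split_ifs <;> simp_all
    | succ n =>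
      simp only [List.set_cons_succ, List.count_cons, List.getD_cons_succ]
      have := ih n (by simpa using hi) ; omega
theorem set_set_perm (l : List Int) (i j : Nat) (b : Int) (hij : i ≠ j)
    (hi : i < l.length) (hj : j < l.length) :
    ((l.set i (l.getD j 0)).set j b).Perm (l.set i b) := by
  rw [List.perm_iff_count]
  intro v
  have h1 := count_set (l.set i (l.getD j 0)) j (by simpa using hj) b v
  have h2 := count_set l i hi (l.getD j 0) v
  have h3 := count_set l i hi b v
  rw [getD_set] at h1
  simp only [hij, false_and, if_false] at h1
  split_ifs at h1 h2 h3 <;> omega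
theorem siftdown_perm (ni : Int) (pos : Nat) : ∀ (heap : List Int), pos < heap.length →
    (siftdown heap 0 ni pos).Perm (heap.set pos ni) := by
  induction pos using Nat.strong_induction_on with
  | _ pos ih =>
    intro heap hp
    rw [siftdown]
    simp only
    split
    · next h0 =>
      split
      · next hlt =>
        refine List.Perm.trans (ih ((pos-1)/2) (by omega) _ (by simp; omega)) ?_
        exact set_set_perm heap pos ((pos-1)/2) ni (by omega) hp (by omega)
      · exact List.Perm.refl _
    · exact List.Perm.refl _
theorem siftup_perm_aux (ni : Int) : ∀ (n : Nat) (pos : Nat) (heap : List Int),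
    heap.length - pos = n → pos < heap.length →
    (siftup heap 0 pos ni).Perm (heap.set pos ni) := by
  intro n
  induction n using Nat.strong_induction_on with
  | _ n ih =>
    intro pos heap hn hp
    rw [siftup]
    simp only
    split
    · next hc =>
      split
      · next hr =>
        refine List.Perm.trans
          (ih (heap.length - (2*pos+1+1)) (by omega) _ _ (by simp) (by simp; omega)) ?_
        exact set_set_perm heap pos (2*pos+1+1) ni (by omega) hp (by omega)
      · next hr =>
        refine List.Perm.trans
          (ih (heap.length - (2*pos+1)) (by omega) _ _ (by simp) (by simp; omega)) ?_
        exact set_set_perm heap pos (2*pos+1) ni (by omega) hp hc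
    · next hc =>
      refine List.Perm.trans (siftdown_perm ni pos _ (by simpa using hp)) ?_
      rw [List.set_set]
theorem siftup_perm (ni : Int) (pos : Nat) (heap : List Int) (hp : pos < heap.length) :
    (siftup heap 0 pos ni).Perm (heap.set pos ni) := by
  exact siftup_perm_aux ni _ pos heap rfl hp
def IsHeap (h : List Int) : Prop :=
  ∀ i c, c < h.length → (c = 2*i+1 ∨ c = 2*i+2) → h.getD i 0 ≤ h.getD c 0
def HeapExcept (h : List Int) (p : Nat) : Prop :=
  ∀ i c, c < h.length → (c = 2*i+1 ∨ c = 2*i+2) → i ≠ p → c ≠ p → h.getD i 0 ≤ h.getD c 0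

theorem set_pos_isHeap (heap : List Int) (pos : Nat) (ni : Int)
    (hp : pos < heap.length) (hex : HeapExcept heap pos)
    (hb1 : ∀ c, c < heap.length → (c = 2*pos+1 ∨ c = 2*pos+2) → ni ≤ heap.getD c 0)
    (hpar : 0 < pos → heap.getD ((pos-1)/2) 0 ≤ ni) :
    IsHeap (heap.set pos ni) := by
  intro i c hc hcc
  rw [List.length_set] at hc
  rw [getD_set, getD_set]
  by_cases hcp : c = pos
  · have hi : i = (pos-1)/2 := by omega
    have hip : i ≠ pos := by omega
    rw [if_neg (fun hh : pos = i ∧ _ => hip hh.1.symm), if_pos ⟨hcp.symm, hc⟩]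
    exact hi ▸ hpar (by omega)
  · by_cases hip : i = pos
    · rw [if_pos ⟨hip.symm, hip ▸ hp⟩, if_neg (fun hh : pos = c ∧ _ => hcp hh.1.symm)]
      exact hb1 c hc (hip ▸ hcc)
    · rw [if_neg (fun hh : pos = i ∧ _ => hip hh.1.symm),
          if_neg (fun hh : pos = c ∧ _ => hcp hh.1.symm)]
      exact hex i c hc hcc hip hcp

theorem siftdown_isHeap (ni : Int) : ∀ (pos : Nat) (heap : List Int),
    pos < heap.length → HeapExcept heap pos →
    (∀ c, c < heap.length → (c = 2*pos+1 ∨ c = 2*pos+2) → ni ≤ heap.getD c 0) →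
    (∀ c, c < heap.length → (c = 2*pos+1 ∨ c = 2*pos+2) → 0 < pos →
      heap.getD ((pos-1)/2) 0 ≤ heap.getD c 0) →
    IsHeap (siftdown heap 0 ni pos) := by
  intro pos
  induction pos using Nat.strong_induction_on with
  | _ pos ih =>
    intro heap hp hex hb1 hb2
    rw [siftdown]
    simp only
    split
    · next h0 =>
      split
      · next hlt =>
        -- recursive step: move the parent down to pos, continue at pp := (pos-1)/2
        refine ih ((pos-1)/2) (by omega) _ (by simp; omega) ?_ ?_ ?_
        · -- HeapExcept (heap.set pos parent) pp
          intro i c hc hcc hipn hcpn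
          rw [List.length_set] at hc
          rw [getD_set, getD_set]
          by_cases hcp : c = pos
          · exact absurd (by omega : i = (pos-1)/2) hipn
          · by_cases hip : i = pos
            · rw [if_pos ⟨hip.symm, hip ▸ hp⟩, if_neg (fun hh : pos = c ∧ _ => hcp hh.1.symm)]
              exact hb2 c hc (hip ▸ hcc) h0
            · rw [if_neg (fun hh : pos = i ∧ _ => hip hh.1.symm),
                  if_neg (fun hh : pos = c ∧ _ => hcp hh.1.symm)]
              exact hex i c hc hcc hip hcp
        · -- b1 at pp
          intro c hc hcc
          rw [List.length_set] at hc
          rw [getD_set]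
          by_cases hcp : c = pos
          · rw [if_pos ⟨hcp.symm, hc⟩]
            exact le_of_lt hlt
          · rw [if_neg (fun hh : pos = c ∧ _ => hcp hh.1.symm)]
            have := hex ((pos-1)/2) c hc hcc (by omega) hcp
            linarith
        · -- b2 at pp
          intro c hc hcc hpp0
          rw [List.length_set] at hc
          rw [getD_set, getD_set]
          have hgp : heap.getD (((pos-1)/2-1)/2) 0 ≤ heap.getD ((pos-1)/2) 0 :=
            hex (((pos-1)/2-1)/2) ((pos-1)/2) (by omega) (by omega) (by omega) (by omega)
          rw [if_neg (by omega : ¬ (pos = ((pos-1)/2-1)/2 ∧ ((pos-1)/2-1)/2 < heap.length))]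
          by_cases hcp : c = pos
          · rw [if_pos ⟨hcp.symm, hc⟩]
            exact hgp
          · rw [if_neg (fun hh : pos = c ∧ _ => hcp hh.1.symm)]
            exact le_trans hgp (hex ((pos-1)/2) c hc hcc (by omega) hcp)
      · next hge =>
        exact set_pos_isHeap heap pos ni hp hex hb1 (fun h0' => by linarith [not_lt.mp hge])
    · next h0 =>
      have hp0 : pos = 0 := by omega
      exact set_pos_isHeap heap pos ni hp hex hb1 (by omega)

theorem siftup_step (heap : List Int) (pos k : Nat)
    (hp : pos < heap.length) (hk : k < heap.length) (hkchild : k = 2*pos+1 ∨ k = 2*pos+2)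
    (hmin : ∀ c, c < heap.length → (c = 2*pos+1 ∨ c = 2*pos+2) →
      heap.getD k 0 ≤ heap.getD c 0)
    (hex : HeapExcept heap pos)
    (hb2 : ∀ c, c < heap.length → (c = 2*pos+1 ∨ c = 2*pos+2) → 0 < pos →
      heap.getD ((pos-1)/2) 0 ≤ heap.getD c 0) :
    HeapExcept (heap.set pos (heap.getD k 0)) k ∧
    (∀ c, c < (heap.set pos (heap.getD k 0)).length → (c = 2*k+1 ∨ c = 2*k+2) → 0 < k →
      (heap.set pos (heap.getD k 0)).getD ((k-1)/2) 0
        ≤ (heap.set pos (heap.getD k 0)).getD c 0) := by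
  constructor
  · intro i c hc hcc hik hck
    rw [List.length_set] at hc
    rw [getD_set, getD_set]
    by_cases hcp : c = pos
    · have hi : i = (pos-1)/2 := by omega
      have hip : i ≠ pos := by omega
      rw [if_neg (fun hh : pos = i ∧ _ => hip hh.1.symm), if_pos ⟨hcp.symm, hc⟩]
      exact hi ▸ hb2 k hk hkchild (by omega)
    · by_cases hip : i = pos
      · rw [if_pos ⟨hip.symm, hip ▸ hp⟩, if_neg (fun hh : pos = c ∧ _ => hcp hh.1.symm)]
        exact hmin c hc (hip ▸ hcc)
      · rw [if_neg (fun hh : pos = i ∧ _ => hip hh.1.symm),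
            if_neg (fun hh : pos = c ∧ _ => hcp hh.1.symm)]
        exact hex i c hc hcc hip hcp
  · intro c hc hcc hk0
    rw [List.length_set] at hc
    have hkp : (k-1)/2 = pos := by omega
    rw [getD_set, getD_set, hkp]
    rw [if_pos ⟨rfl, hp⟩, if_neg (by omega : ¬ (pos = c ∧ c < heap.length))]
    exact hex k c hc hcc (by omega) (by omega)

theorem siftup_isHeap (ni : Int) : ∀ (n pos : Nat) (heap : List Int),
    heap.length - pos = n → pos < heap.length → HeapExcept heap pos →
    (∀ c, c < heap.length → (c = 2*pos+1 ∨ c = 2*pos+2) → 0 < pos →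
      heap.getD ((pos-1)/2) 0 ≤ heap.getD c 0) →
    IsHeap (siftup heap 0 pos ni) := by
  intro n
  induction n using Nat.strong_induction_on with
  | _ n ih =>
    intro pos heap hn hp hex hb2
    rw [siftup]
    simp only
    split
    · next hc =>
      split
      · next hr =>
        have hstep := siftup_step heap pos (2*pos+1+1) hp hr.1 (by omega)
          (by intro c hcl hcc
              rcases hcc with h1 | h1
              · subst h1; exact le_of_not_gt hr.2
              · subst h1; exact le_refl _)
          hex hb2
        exact ih ((heap.set pos (heap.getD (2*pos+1+1) 0)).length - (2*pos+1+1))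
          (by simp; omega) _ _ rfl (by simp; omega) hstep.1 hstep.2
      · next hr =>
        have hmin : ∀ c, c < heap.length → (c = 2*pos+1 ∨ c = 2*pos+2) →
            heap.getD (2*pos+1) 0 ≤ heap.getD c 0 := by
          intro c hcl hcc
          rcases hcc with h1 | h1
          · subst h1; exact le_refl _
          · subst h1
            rcases not_and_or.mp hr with h2 | h2
            · omega
            · exact le_of_lt (not_not.mp h2)
        have hstep := siftup_step heap pos (2*pos+1) hp hc (by omega) hmin hex hb2
        exact ih ((heap.set pos (heap.getD (2*pos+1) 0)).length - (2*pos+1))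
          (by simp; omega) _ _ rfl (by simp; omega) hstep.1 hstep.2
    · next hc =>
      apply siftdown_isHeap ni pos _ (by simpa using hp)
      · intro i c hcl hcc hip hcp
        rw [List.length_set] at hcl
        rw [getD_set, getD_set,
            if_neg (fun hh : pos = i ∧ _ => hip hh.1.symm),
            if_neg (fun hh : pos = c ∧ _ => hcp hh.1.symm)]
        exact hex i c hcl hcc hip hcp
      · intro c hcl hcc
        rw [List.length_set] at hcl
        omega
      · intro c hcl hcc
        rw [List.length_set] at hcl
        omega

theorem root_min (h : List Int) (hh : IsHeap h) :
    ∀ i, i < h.length → h.getD 0 0 ≤ h.getD i 0 := by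
  intro i
  induction i using Nat.strong_induction_on with
  | _ i ih =>
    intro hi
    rcases Nat.eq_zero_or_pos i with h0 | h0
    · subst h0; exact le_refl _
    · exact le_trans (ih ((i-1)/2) (by omega) (by omega)) (hh ((i-1)/2) i hi (by omega))

theorem set_append_last (l : List Int) (x y : Int) :
    (l ++ [x]).set l.length y = l ++ [y] := by
  induction l with
  | nil => rfl
  | cons a t ih => simp [ih]

theorem heappush_perm (h : List Int) (x : Int) : (heappush h x).Perm (x :: h) := by
  unfold heappush
  refine List.Perm.trans (siftdown_perm x h.length (h ++ [x]) (by simp)) ?_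
  rw [set_append_last]
  exact List.perm_append_singleton x h

theorem heappush_isHeap (h : List Int) (x : Int) (hh : IsHeap h) :
    IsHeap (heappush h x) := by
  unfold heappush
  apply siftdown_isHeap x h.length (h ++ [x]) (by simp)
  · intro i c hc hcc hin hcn
    simp only [List.length_append, List.length_cons, List.length_nil] at hc
    have hcl : c < h.length := by omega
    have hil : i < h.length := by omega
    rw [List.getD_append _ _ _ _ hil, List.getD_append _ _ _ _ hcl]
    exact hh i c hcl hcc
  · intro c hc hcc
    simp only [List.length_append, List.length_cons, List.length_nil] at hc
    omega
  · intro c hc hcc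
    simp only [List.length_append, List.length_cons, List.length_nil] at hc
    omega

theorem heappop_spec (h : List Int) (hh : IsHeap h) (hne : h ≠ []) :
    (heappop h).1 = h.getD 0 0 ∧ h.Perm ((heappop h).1 :: (heappop h).2) ∧
      IsHeap (heappop h).2 := by
  by_cases hemp : h.dropLast = []
  · -- h is a singleton
    have hlen : h.length = 1 := by
      have h1 := List.length_dropLast (xs := h)
      rw [hemp] at h1
      have h2 := List.length_pos_iff.mpr hne
      simp at h1
      omega
    obtain ⟨a, ha⟩ := List.length_eq_one_iff.mp hlen
    subst ha
    refine ⟨rfl, List.Perm.refl _, ?_⟩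
    intro i c hc hcc
    simp [heappop] at hc
  · -- general case: h = r0 :: (rt ++ [last])
    have hsplit : h.dropLast ++ [h.getLast hne] = h := List.dropLast_concat_getLast hne
    have hlastd : h.getLastD 0 = h.getLast hne := by
      cases h with
      | nil => exact absurd rfl hne
      | cons a t => simp [List.getLastD_eq_getLast?, List.getLast?_eq_some_getLast]
    obtain ⟨r0, rt, hrest⟩ : ∃ r0 rt, h.dropLast = r0 :: rt := by
      cases hr : h.dropLast with
      | nil => exact absurd hr hemp
      | cons r0 rt => exact ⟨r0, rt, rfl⟩
    have hform : h = r0 :: (rt ++ [h.getLast hne]) := by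
      conv_lhs => rw [← hsplit, hrest]
      simp
    have hpop : heappop h = (r0, siftup (h.getLastD 0 :: rt) 0 0 (h.getLastD 0)) := by
      unfold heappop
      simp only [hrest]
      rw [if_neg (by simp)]
      simp
    have hlen : h.length = rt.length + 2 := by rw [hform]; simp
    have hperm1 : (siftup (h.getLastD 0 :: rt) 0 0 (h.getLastD 0)).Perm
        (h.getLastD 0 :: rt) := by
      have := siftup_perm (h.getLastD 0) 0 (h.getLastD 0 :: rt) (by simp)
      simpa using this
    rw [hpop]
    have hform' : h = r0 :: (rt ++ [h.getLastD 0]) := by rw [hlastd]; exact hform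
    refine ⟨?_, ?_, ?_⟩
    · conv_rhs => rw [hform']
      rfl
    · conv_lhs => rw [hform']
      exact List.Perm.cons r0
        (List.Perm.trans (List.perm_append_singleton _ _) hperm1.symm)
    · apply siftup_isHeap (h.getLastD 0) _ 0 _ rfl (by simp)
      · intro i c hc hcc hip hcp
        simp only [List.length_cons] at hc
        obtain ⟨i', rfl⟩ : ∃ i', i = i' + 1 := ⟨i - 1, by omega⟩
        obtain ⟨c', rfl⟩ : ∃ c', c = c' + 1 := ⟨c - 1, by omega⟩
        simp only [List.getD_cons_succ]
        have e1 : ∀ j, j < rt.length → rt.getD j 0 = h.getD (j+1) 0 := by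
          intro j hj
          rw [hform]
          simp only [List.getD_cons_succ]
          rw [List.getD_append _ _ _ _ hj]
        have hc' : c' < rt.length := by omega
        have hi' : i' < rt.length := by omega
        rw [e1 i' hi', e1 c' hc']
        exact hh (i'+1) (c'+1) (by omega) (by omega)
      · intro c hc hcc h0
        omega

theorem insort_eq (s : List Int) (x : Int) (hs : s.Pairwise (· ≤ ·)) :
    insort s x = s.take (PySem.List.bisectRight s x) ++ x :: s.drop (PySem.List.bisectRight s x) := by
  unfold insort
  exact PySem.List.insert_natCast s _ x (PySem.List.bisectRight_spec s x hs).1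

theorem insort_perm (s : List Int) (x : Int) (hs : s.Pairwise (· ≤ ·)) :
    (insort s x).Perm (x :: s) := by
  rw [insort_eq s x hs]
  have := List.perm_middle (a := x) (l₁ := s.take (PySem.List.bisectRight s x))
    (l₂ := s.drop (PySem.List.bisectRight s x))
  rw [List.take_append_drop] at this
  exact this

theorem insort_sorted (s : List Int) (x : Int) (hs : s.Pairwise (· ≤ ·)) :
    (insort s x).Pairwise (· ≤ ·) := by
  rw [insort_eq s x hs]
  obtain ⟨hk, hle, hgt⟩ := PySem.List.bisectRight_spec s x hs
  set k := PySem.List.bisectRight s x with hkdef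
  rw [List.pairwise_append]
  refine ⟨hs.sublist (List.take_sublist _ _), ?_, ?_⟩
  · rw [List.pairwise_cons]
    refine ⟨?_, hs.sublist (List.drop_sublist _ _)⟩
    intro b hb
    obtain ⟨j, hj, rfl⟩ := List.mem_iff_getElem.mp hb
    rw [List.getElem_drop]
    exact le_of_lt (hgt (k + j) (by simp at hj; omega) (by omega))
  · intro a ha b hb
    obtain ⟨j, hj, rfl⟩ := List.mem_iff_getElem.mp ha
    have hjk : j < k := by simp at hj; omega
    have hjl : j < s.length := by simp at hj; omega
    rw [List.getElem_take]
    have hax : s[j] ≤ x := hle j hjl hjk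
    rcases List.mem_cons.mp hb with rfl | hb'
    · exact hax
    · obtain ⟨j', hj', rfl⟩ := List.mem_iff_getElem.mp hb'
      rw [List.getElem_drop]
      exact le_trans hax (le_of_lt (hgt (k + j') (by simp at hj'; omega) (by omega)))

theorem root_eq_head (h : List Int) (m : Int) (st : List Int)
    (hh : IsHeap h) (hperm : h.Perm (m :: st)) (hs : (m :: st).Pairwise (· ≤ ·)) :
    h.getD 0 0 = m := by
  have hne : h ≠ [] := by
    intro he
    subst he
    simpa using hperm.length_eq
  have hlen : 0 < h.length := List.length_pos_iff.mpr hne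
  have hmem : h.getD 0 0 ∈ h := by
    rw [List.getD_eq_getElem h 0 hlen]
    exact List.getElem_mem hlen
  have hmem' : h.getD 0 0 ∈ m :: st := hperm.mem_iff.mp hmem
  have hge : m ≤ h.getD 0 0 := by
    rcases List.mem_cons.mp hmem' with he | hmem'' 
    · exact he.ge
    · exact (List.pairwise_cons.mp hs).1 _ hmem''
  have hm_mem : m ∈ h := hperm.mem_iff.mpr (List.mem_cons_self)
  obtain ⟨i, hi, hie⟩ := List.mem_iff_getElem.mp hm_mem
  have hle : h.getD 0 0 ≤ m := by
    rw [← hie, ← List.getD_eq_getElem h 0 hi]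
    exact root_min h hh i hi
  exact le_antisymm hle hge

theorem solutionStep_def (st : List Int × List Int) (x : Int) : solutionStep st x =
    if x == 0 then
      if st.1.isEmpty then (st.1, st.2 ++ [0])
      else ((heappop st.1).2, st.2 ++ [(heappop st.1).1])
    else (heappush st.1 x, st.2) := rfl

theorem loop_eq (nums : List Int) : ∀ (h neg ans : List Int),
    h.Perm (neg.map (fun v => -v)) → IsHeap h → neg.Pairwise (· ≤ ·) →
    (nums.foldl solutionStep (h, ans)).2 = (nums.foldl altStep (neg, ans)).2 := by
  induction nums with
  | nil => intro h neg ans _ _ _; rfl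
  | cons x ns ih =>
    intro h neg ans hperm hh hs
    simp only [List.foldl_cons]
    by_cases hx : x = 0
    · subst hx
      rw [solutionStep_def]
      simp only [BEq.rfl, if_true]
      unfold altStep
      simp only [ne_eq, not_true_eq_false, if_false]
      rcases List.eq_nil_or_concat neg with rfl | ⟨nd, lst, hc⟩
      · have hhe : h = [] := by
          have := hperm.length_eq
          simp at this
          exact this
        subst hhe
        simp only [List.isEmpty_nil, if_true]
        exact ih [] [] (ans ++ [0]) (by simp) hh hs
      · rw [List.concat_eq_append] at hc
        subst hc
        have hne : h ≠ [] := by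
          intro he
          subst he
          simpa using hperm.length_eq
        have hnege : ¬ (nd ++ [lst]).isEmpty := by simp
        rw [if_neg (by simpa [List.isEmpty_iff] using hne), if_neg hnege]
        have hdl : (nd ++ [lst]).dropLast = nd := by simp
        have hld : (nd ++ [lst]).getLastD 0 = lst := by
          rw [List.getLastD_eq_getLast?, List.getLast?_concat]
          rfl
        rw [hdl, hld]
        -- the sorted picture of the heap contents, smallest first
        have hmperm : ((nd ++ [lst]).map (fun v => -v)).Perm
            (-lst :: (nd.map (fun v => -v)).reverse) := by
          rw [List.map_append]
          refine List.Perm.trans (List.perm_append_singleton _ _) ?_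
          exact List.Perm.cons _ (List.reverse_perm _).symm
        have hndle : ∀ a ∈ nd, a ≤ lst := by
          have := (List.pairwise_append.mp hs).2.2
          intro a ha
          exact this a ha lst (by simp)
        have hsorted : (-lst :: (nd.map (fun v => -v)).reverse).Pairwise (· ≤ ·) := by
          rw [List.pairwise_cons]
          constructor
          · intro b hb
            simp only [List.mem_reverse, List.mem_map] at hb
            obtain ⟨a, ha, rfl⟩ := hb
            have := hndle a ha
            omega
          · rw [List.pairwise_reverse]
            refine List.Pairwise.map _ ?_ (List.pairwise_append.mp hs).1
            intro a b hab
            omega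
        have hperm' : h.Perm (-lst :: (nd.map (fun v => -v)).reverse) :=
          hperm.trans hmperm
        obtain ⟨hm, hperm2, hheap2⟩ := heappop_spec h hh hne
        have hmm : (heappop h).1 = -lst := by
          rw [hm]
          exact root_eq_head h (-lst) _ hh hperm' hsorted
        rw [hmm]
        refine ih _ _ _ ?_ hheap2 (List.pairwise_append.mp hs).1
        have hcons : (-lst :: (heappop h).2).Perm (-lst :: nd.map (fun v => -v)) := by
          refine List.Perm.trans ?_ (hperm.trans ?_)
          · rw [← hmm]
            exact hperm2.symm
          · rw [List.map_append]
            exact List.perm_append_singleton _ _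
        exact (List.perm_cons (-lst)).mp hcons
    · rw [solutionStep_def]
      rw [if_neg (by simpa using hx)]
      unfold altStep
      rw [if_pos hx]
      refine ih _ _ _ ?_ (heappush_isHeap h x hh) (insort_sorted neg (-x) hs)
      refine ((heappush_perm h x).trans (List.Perm.cons x hperm)).trans ?_
      have : ((insort neg (-x)).map (fun v => -v)).Perm (((-x) :: neg).map (fun v => -v)) :=
        (insort_perm neg (-x) hs).map _
      refine List.Perm.trans ?_ this.symm
      simp

-- ===== VERDICT (by name: the statement is the Claim_ definition above) =====
theorem solution_spec : Claim_equal_solution := by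
  intro nums _
  unfold Spec_solution solution solution_alt
  exact loop_eq nums [] [] [] (List.Perm.refl _) (by intro i c hc _; simp at hc) (by simp)
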